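-- pv_equiv track=rewrite | github.com/guisoares9/computer-graphics-task1 | objects.py | __triangularization
-- ===== SOURCE A (Python) =====
-- def __triangularization(points, center):
--
--     aux = []
--     for i in range(len(points)):
--         aux.append(points[i])
--         aux.append(points[i])
--
--     points = aux.copy()
--     points.pop(0)
--     points.pop(len(points)-1)
--
--     for i in range(len(aux), 0, -1):
--         if (i%2 == 0) & (i != 0) & (i != len(aux)):
--             points.insert(i, center)
--
--     return points
-- ===== SOURCE B (Python) =====
-- def __triangularization(points, center):
--     out = []
--     for a, b in zip(points, points[1:]):
--         out += [a, b, center]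
--     return out
-- ===== Notes on version B (the rewrite author's own statement) =====
-- stated objective: simpler
-- what changed: B emits each triangle (p[i], p[i+1], center) in one forward pass over zipped consecutive pairs, replacing A's doubled list, two pops and descending-index center insertions.
import Mathlib
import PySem

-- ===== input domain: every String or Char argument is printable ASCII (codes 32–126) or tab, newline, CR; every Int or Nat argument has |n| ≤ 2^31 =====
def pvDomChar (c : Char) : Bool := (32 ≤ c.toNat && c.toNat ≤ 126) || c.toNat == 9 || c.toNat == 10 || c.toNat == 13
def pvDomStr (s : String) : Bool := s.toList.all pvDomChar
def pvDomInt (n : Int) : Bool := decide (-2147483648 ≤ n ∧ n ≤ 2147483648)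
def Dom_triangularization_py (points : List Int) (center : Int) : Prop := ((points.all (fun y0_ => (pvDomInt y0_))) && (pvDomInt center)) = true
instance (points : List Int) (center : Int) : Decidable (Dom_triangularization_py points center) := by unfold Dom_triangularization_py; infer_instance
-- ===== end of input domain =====

-- B replaces A's build-doubled-list / pop / reverse-index-insert splice by one forward pass
-- over consecutive vertex pairs (zip), emitting each triangle (pᵢ, pᵢ₊₁, center) directly: simpler.


-- ===== PORT A =====
def triangularization_py (points : List Int) (center : Int) : List Int :=
  -- aux = []; for i in range(len(points)): aux.append(points[i]); aux.append(points[i])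
  let aux : List Int :=
    (PySem.List.pyRange 0 (points.length : Int) 1).foldl
      (fun acc i => (acc ++ [PySem.List.pyGetD points i 0]) ++ [PySem.List.pyGetD points i 0]) []
  -- points = aux.copy(); points.pop(0)
  match PySem.List.pop? aux 0 with
  | none => []          -- IndexError on empty list: excluded by Pre_
  | some (_, pts1) =>
    -- points.pop(len(points)-1)
    match PySem.List.pop? pts1 ((pts1.length : Int) - 1) with
    | none => []        -- IndexError: unreachable under Pre_
    | some (_, pts2) =>
      -- for i in range(len(aux), 0, -1): if (i%2==0)&(i!=0)&(i!=len(aux)): points.insert(i, center)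
      (PySem.List.pyRange (aux.length : Int) 0 (-1)).foldl
        (fun ps i =>
          if (PySem.Int.mod i 2 == 0) && (i != 0) && (i != (aux.length : Int)) then
            PySem.List.insert ps i center
          else ps) pts2

-- ===== PORT B =====
def triangularization_py_alt (points : List Int) (center : Int) : List Int :=
  -- out = []; for a, b in zip(points, points[1:]): out += [a, b, center]
  (points.zip (PySem.List.slice points (some 1) none)).foldl
    (fun out ab => out ++ [ab.1, ab.2, center]) []

-- ===== PRECONDITION & SPEC =====
-- Pre_ excludes only the empty vertex list, on which A raises IndexError (pop(0) of []).
def Pre_triangularization_py (points : List Int) (center : Int) : Prop := points ≠ []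
instance (points : List Int) (center : Int) : Decidable (Pre_triangularization_py points center) := by unfold Pre_triangularization_py; infer_instance
def pvWitness_triangularization_py : List Int × Int := ([1, 2, 3], 7)

def Spec_triangularization_py (points : List Int) (center : Int) (out : List Int) : Prop := out = triangularization_py_alt points center
instance (points : List Int) (center : Int) (out : List Int) : Decidable (Spec_triangularization_py points center out) := by unfold Spec_triangularization_py; infer_instance

-- ===== CLAIM (what is proved, stated in full; the proofs are below) =====
def Claim_equal_triangularization_py : Prop := ∀ (points : List Int) (center : Int), Dom_triangularization_py points center → Pre_triangularization_py points center → Spec_triangularization_py points center (triangularization_py points center)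

-- ===== LEMMAS AND PROOFS =====

-- the fan of triangles over consecutive pairs: x, y, c, then on from y
def pvFan (c : Int) : List Int → List Int
  | x :: y :: t => x :: y :: c :: pvFan c (y :: t)
  | _ => []

-- each vertex duplicated in place
def pvDbl : List Int → List Int
  | [] => []
  | x :: t => x :: x :: pvDbl t

theorem pvDbl_length (l : List Int) : (pvDbl l).length = 2 * l.length := by
  induction l with
  | nil => simp [pvDbl]
  | cons x t ih => simp [pvDbl, ih]; omega

-- B's zip fold is pvFan
theorem pvB_eq_fan (c : Int) (xs : List Int) (acc : List Int) :
    (xs.zip xs.tail).foldl (fun out ab => out ++ [ab.1, ab.2, c]) acc = acc ++ pvFan c xs := by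
  induction xs generalizing acc with
  | nil => simp [pvFan]
  | cons x t ih =>
    cases t with
    | nil => simp [pvFan]
    | cons y u =>
      have := ih (acc := acc ++ [x, y, c])
      simp only [List.tail_cons] at this ⊢
      simp only [List.zip_cons_cons, List.foldl_cons, this, pvFan]
      simp

-- A's doubling loop builds pvDbl
theorem pvAux_eq_dbl (l : List Int) (acc : List Int) :
    l.foldl (fun acc x => (acc ++ [x]) ++ [x]) acc = acc ++ pvDbl l := by
  induction l generalizing acc with
  | nil => simp [pvDbl]
  | cons x t ih => simp only [List.foldl_cons]; rw [ih]; simp [pvDbl]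

-- c spliced after every disjoint pair
def pvPair (c : Int) : List Int → List Int
  | a :: b :: t => a :: b :: c :: pvPair c t
  | _ => []

-- an even-length list splits off its last two elements
theorem pvSplit2 (L : List Int) (h : 2 ≤ L.length) : ∃ L' a b, L = L' ++ [a, b] := by
  induction L using List.reverseRecOn with
  | nil => simp at h
  | append_singleton M b ihb =>
    cases M using List.reverseRecOn with
    | nil => simp at h
    | append_singleton K a _ => exact ⟨K, a, b, by simp⟩

theorem pvPair_append (c : Int) (m : Nat) (L : List Int) (h : L.length = 2 * m) (a b : Int) :
    pvPair c (L ++ [a, b]) = pvPair c L ++ [a, b, c] := by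
  induction m generalizing L with
  | zero =>
    have : L = [] := List.eq_nil_of_length_eq_zero (by omega)
    subst this; simp [pvPair]
  | succ m ih =>
    cases L with
    | nil => simp at h
    | cons u L2 =>
      cases L2 with
      | nil => simp at h; omega
      | cons v t =>
        simp only [List.cons_append, pvPair]
        rw [ih t (by simp at h; omega)]

-- the descending insert loop interleaves c after every pair
theorem pvLoop (c : Int) (N : Int) (m : Nat) (L1 L2 : List Int)
    (h1 : L1.length = 2 * m) (hN : (2 * m : Int) < N) :
    (PySem.List.pyRange (2 * m : Int) 0 (-1)).foldl
      (fun ps i =>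
        if (PySem.Int.mod i 2 == 0) && (i != 0) && (i != N) then
          PySem.List.insert ps i c
        else ps) (L1 ++ L2) = pvPair c L1 ++ L2 := by
  induction m generalizing L1 L2 with
  | zero =>
    have : L1 = [] := List.eq_nil_of_length_eq_zero (by omega)
    subst this
    rw [show ((2 * ((0:Nat):Int))) = (0:Int) by norm_num,
      PySem.List.pyRange_neg_one_eq_nil le_rfl]
    simp [pvPair]
  | succ m ih =>
    obtain ⟨L', a, b, rfl⟩ := pvSplit2 L1 (by omega)
    have hL' : L'.length = 2 * m := by simp at h1; omega
    have hc : (2 * ((m + 1 : Nat) : Int)) = 2 * (m : Int) + 2 := by push_cast; ring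
    rw [hc] at hN ⊢
    rw [PySem.List.pyRange_neg_one_cons (by omega),
      show (2 * (m : Int) + 2 - 1) = 2 * (m : Int) + 1 by ring,
      PySem.List.pyRange_neg_one_cons (by omega),
      show (2 * (m : Int) + 1 - 1) = 2 * (m : Int) by ring]
    have hm0 : PySem.Int.mod (2 * (m : Int) + 2) 2 = 0 := by
      rw [PySem.Int.mod_eq_emod_of_pos (by norm_num)]; omega
    have hm1 : PySem.Int.mod (2 * (m : Int) + 1) 2 = 1 := by
      rw [PySem.Int.mod_eq_emod_of_pos (by norm_num)]; omega
    have c1 : ((PySem.Int.mod (2 * (m : Int) + 2) 2 == 0) && ((2 * (m : Int) + 2) != 0) && ((2 * (m : Int) + 2) != N)) = true := by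
      rw [hm0]; simp [show (2 * (m : Int) + 2) ≠ 0 by omega, show (2 * (m : Int) + 2) ≠ N by omega]
    have c0 : ((PySem.Int.mod (2 * (m : Int) + 1) 2 == 0) && ((2 * (m : Int) + 1) != 0) && ((2 * (m : Int) + 1) != N)) = false := by
      rw [hm1]; simp
    simp only [List.foldl_cons, c1, c0, if_true, Bool.false_eq_true, if_false]
    rw [show (2 * (m : Int) + 2) = ((2 * m + 2 : Nat) : Int) by push_cast; ring,
      PySem.List.insert_natCast _ _ _ (by simp; omega)]
    rw [List.take_left' (by simp [hL']), List.drop_left' (by simp [hL'])]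
    rw [show (L' ++ [a, b]) ++ c :: L2 = L' ++ ([a, b, c] ++ L2) by simp]
    rw [ih L' ([a, b, c] ++ L2) hL' (by omega)]
    rw [pvPair_append c m L' hL']
    simp

-- ===== VERDICT (by name: the statement is the Claim_ definition above) =====
-- glue: pvPair on the doubled-minus-ends list is the fan
theorem pvPair_dbl (c : Int) (x : Int) (t : List Int) :
    pvPair c ((x :: pvDbl t).dropLast) = pvFan c (x :: t) := by
  induction t generalizing x with
  | nil => simp [pvDbl, pvPair, pvFan]
  | cons y u ih =>
    have hne : (y :: pvDbl u) ≠ [] := by simp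
    simp only [pvDbl]
    rw [show (x :: y :: y :: pvDbl u).dropLast = x :: y :: (y :: pvDbl u).dropLast by
      simp [List.dropLast]]
    simp only [pvPair, pvFan, ih y]

theorem triangularization_py_spec : Claim_equal_triangularization_py := by
  intro points center _ hpre
  unfold Spec_triangularization_py triangularization_py triangularization_py_alt
  obtain ⟨x, t, rfl⟩ : ∃ x t, points = x :: t := by
    cases points with
    | nil => exact absurd rfl hpre
    | cons x t => exact ⟨x, t, rfl⟩
  rw [PySem.List.slice_from_one, pvB_eq_fan, List.nil_append]
  rw [PySem.List.foldl_pyRange_zero_pyGetD' (x :: t) 0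
    (fun acc x => (acc ++ [x]) ++ [x]) [], pvAux_eq_dbl, List.nil_append]
  simp only [pvDbl, PySem.List.pop?_zero_cons]
  have hlt : (x :: pvDbl t).length = 2 * t.length + 1 := by simp [pvDbl_length]
  rw [show (((x :: pvDbl t).length : Int) - 1) = ((2 * t.length : Nat) : Int) by
    rw [hlt]; push_cast; ring]
  rw [PySem.List.pop?_natCast _ _ (by omega)]
  rw [show (x :: pvDbl t).eraseIdx (2 * t.length) = (x :: pvDbl t).dropLast by
    rw [← List.eraseIdx_length_sub_one]; congr 1; omega]
  have hlen2 : ((x :: x :: pvDbl t).length : Int) = 2 * (t.length : Int) + 2 := by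
    simp [pvDbl_length]; ring
  simp only [hlen2]
  rw [PySem.List.pyRange_neg_one_cons (by omega),
    show (2 * (t.length : Int) + 2 - 1) = 2 * (t.length : Int) + 1 by ring,
    PySem.List.pyRange_neg_one_cons (by omega),
    show (2 * (t.length : Int) + 1 - 1) = 2 * (t.length : Int) by ring]
  have hm1 : PySem.Int.mod (2 * (t.length : Int) + 1) 2 = 1 := by
    rw [PySem.Int.mod_eq_emod_of_pos (by norm_num)]; omega
  have d1 : ((PySem.Int.mod (2 * (t.length : Int) + 2) 2 == 0) && ((2 * (t.length : Int) + 2) != 0) && ((2 * (t.length : Int) + 2) != (2 * (t.length : Int) + 2))) = false := by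
    simp
  have d0 : ((PySem.Int.mod (2 * (t.length : Int) + 1) 2 == 0) && ((2 * (t.length : Int) + 1) != 0) && ((2 * (t.length : Int) + 1) != (2 * (t.length : Int) + 2))) = false := by
    rw [hm1]; simp
  simp only [List.foldl_cons, d1, d0, Bool.false_eq_true, if_false]
  rw [← List.append_nil ((x :: pvDbl t).dropLast)]
  rw [pvLoop center (2 * (t.length : Int) + 2) t.length _ []
    (by simp [pvDbl_length]) (by omega)]
  rw [List.append_nil, pvPair_dbl]
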